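-- pv_equiv track=rewrite | github.com/jrycw/aoc2023-python | day12/python/main01.py | line_factory
-- ===== SOURCE A (Python) =====
-- from itertools import groupby, product
--
-- def line_factory(line):
--     q_index = [i for i, ch in enumerate(line) if ch == "?"]
--     lines = []
--     for symbols in product("#.", repeat=len(q_index)):
--         newline = list(line)  # create a new line list
--         for idx, symbol in zip(q_index, symbols):
--             newline[idx] = symbol
--         lines.append(newline)
--     return lines
-- ===== SOURCE B (Python) =====
-- def line_factory(line):
--     results = [[]]
--     for ch in line:
--         if ch == "?":
--             new = []
--             for partial in results:
--                 dot = partial + ["."]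
--                 partial.append("#")
--                 new.append(partial)
--                 new.append(dot)
--             results = new
--         else:
--             for partial in results:
--                 partial.append(ch)
--     return results
-- ===== Notes on version B (the rewrite author's own statement) =====
-- stated objective: simpler
-- what changed: Replaced the q_index/itertools.product/index-substitution machinery by a single left-to-right scan that extends a list of partial fillings in place ('#' before '.' at each '?'), which yields product's exact order without any index bookkeeping and costs O(total output).
import Mathlib
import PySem

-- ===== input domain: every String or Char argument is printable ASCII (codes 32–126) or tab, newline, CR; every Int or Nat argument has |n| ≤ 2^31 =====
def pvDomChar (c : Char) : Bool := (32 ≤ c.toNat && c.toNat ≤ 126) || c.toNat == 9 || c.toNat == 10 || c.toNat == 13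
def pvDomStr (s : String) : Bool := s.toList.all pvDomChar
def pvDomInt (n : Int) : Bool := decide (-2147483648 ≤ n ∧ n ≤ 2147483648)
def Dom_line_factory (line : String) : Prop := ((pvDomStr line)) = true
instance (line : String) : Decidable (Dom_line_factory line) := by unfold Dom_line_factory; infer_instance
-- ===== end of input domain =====

-- B replaces the product-over-?-indices + in-place substitution by a left-to-right scan
-- extending a list of partial fillings (objective: simpler).

-- ===== PORT A =====

-- itertools.product("#.", repeat=n), in product's exact order (leftmost slot most significant)
def pvProdHD : Nat → List (List Char)
  | 0 => [[]]
  | n + 1 => ['#', '.'].flatMap (fun s => (pvProdHD n).map (s :: ·))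

def line_factory (line : String) : List (List String) :=
  let cs := line.toList
  let q_index := ((PySem.List.enumerate cs).filter (fun p => p.2 == '?')).map (·.1)
  (pvProdHD q_index.length).foldl
    (fun lines symbols =>
      let newline := cs.map (fun c => String.mk [c])
      let newline := (q_index.zip symbols).foldl
        (fun nl p => PySem.List.pySetD nl p.1 (String.mk [p.2])) newline
      lines ++ [newline]) []

-- ===== PORT B =====
-- B extends each partial filling in place (Python mutation of its own fresh lists);
-- ported value-wise: in-place append over all partials = map, the '?' doubling = foldl-append
def line_factory_alt (line : String) : List (List String) :=
  line.toList.foldl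
    (fun results ch =>
      if ch = '?' then
        results.foldl
          (fun new partial_ => new ++ [partial_ ++ ["#"], partial_ ++ ["."]]) []
      else
        results.map (fun partial_ => partial_ ++ [String.mk [ch]]))
    [[]]

-- ===== PRECONDITION & SPEC =====
def Spec_line_factory (line : String) (out : List (List String)) : Prop := out = line_factory_alt line
instance (line : String) (out : List (List String)) : Decidable (Spec_line_factory line out) := by unfold Spec_line_factory; infer_instance

-- ===== CLAIM (what is proved, stated in full; the proofs are below) =====
def Claim_equal_line_factory : Prop := ∀ (line : String), Dom_line_factory line → Spec_line_factory line (line_factory line)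

-- ===== LEMMAS AND PROOFS =====

-- the common reference function: all fillings of cs, leftmost '?' most significant, '#' before '.'
def pvFa : List Char → List (List String)
  | [] => [[]]
  | c :: cs =>
    if c = '?' then (pvFa cs).map ("#" :: ·) ++ (pvFa cs).map ("." :: ·)
    else (pvFa cs).map (String.mk [c] :: ·)

-- substitute symbols at the '?' positions of cs, left to right (truncating like zip)
def pvFill : List Char → List Char → List String
  | [], _ => []
  | c :: cs, sym =>
    if c = '?' then
      match sym with
      | h :: t => String.mk [h] :: pvFill cs t
      | [] => String.mk [c] :: pvFill cs []
    else String.mk [c] :: pvFill cs sym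

def pvE (s : Int) (cs : List Char) : List Int :=
  ((PySem.List.enumerate cs s).filter (fun p => p.2 == '?')).map (·.1)

theorem pvE_nil (s : Int) : pvE s [] = [] := rfl

theorem pvE_cons (s : Int) (c : Char) (cs : List Char) :
    pvE s (c :: cs) = (if c = '?' then [s] else []) ++ pvE (s + 1) cs := by
  simp [pvE, PySem.List.enumerate_cons]
  by_cases h : c = '?' <;> simp [h]

theorem pvSet_at_prefix (pref rest : List String) (x v : String) (s : Int)
    (hs : 0 ≤ s) (hl : pref.length = s.toNat) :
    PySem.List.pySetD (pref ++ x :: rest) s v = pref ++ v :: rest := by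
  obtain ⟨n, rfl⟩ := Int.eq_ofNat_of_zero_le hs
  rw [PySem.List.pySetD_natCast]
  simp only [Int.toNat_natCast] at hl
  rw [← hl]
  induction pref with
  | nil => simp
  | cons a t ih => simp [List.set, ih]

theorem pvFill_nil (cs : List Char) :
    pvFill cs [] = cs.map (fun c => String.mk [c]) := by
  induction cs with
  | nil => rfl
  | cons d ds ihd => by_cases hd : d = '?' <;> simp [pvFill, hd, ihd]

-- pointwise: the zip-substitution fold computes pref ++ pvFill cs sym
theorem pvFill_foldl (cs : List Char) (s : Int) (pref : List String) (sym : List Char)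
    (hs : 0 ≤ s) (hl : pref.length = s.toNat) :
    ((pvE s cs).zip sym).foldl
        (fun nl p => PySem.List.pySetD nl p.1 (String.mk [p.2]))
        (pref ++ cs.map (fun c => String.mk [c]))
      = pref ++ pvFill cs sym := by
  induction cs generalizing s pref sym with
  | nil => simp [pvE_nil, pvFill]
  | cons c cs ih =>
    have hs1 : (0:Int) ≤ s + 1 := by omega
    by_cases hc : c = '?'
    · cases sym with
      | nil =>
        subst hc
        simp [pvE_cons, pvFill, pvFill_nil]
      | cons h t =>
        subst hc
        rw [pvE_cons]
        simp only [pvFill, reduceIte, List.singleton_append, List.zip_cons_cons,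
          List.foldl_cons, List.map_cons]
        rw [pvSet_at_prefix pref _ _ _ s hs hl]
        have : pref ++ String.mk [h] :: cs.map (fun c => String.mk [c])
            = (pref ++ [String.mk [h]]) ++ cs.map (fun c => String.mk [c]) := by simp
        rw [this, ih (s+1) (pref ++ [String.mk [h]]) t hs1 (by simp [hl]; omega)]
        simp
    · simp only [pvE_cons, if_neg hc, List.nil_append, pvFill, List.map_cons]
      have : pref ++ String.mk [c] :: cs.map (fun c => String.mk [c])
          = (pref ++ [String.mk [c]]) ++ cs.map (fun c => String.mk [c]) := by simp
      rw [this, ih (s+1) (pref ++ [String.mk [c]]) sym hs1 (by simp [hl]; omega)]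
      simp [hc]

theorem pvE_length (s : Int) (cs : List Char) :
    (pvE s cs).length = (cs.filter (· = '?')).length := by
  induction cs generalizing s with
  | nil => rfl
  | cons c cs ih =>
    rw [pvE_cons]
    by_cases hc : c = '?' <;> simp [hc, ih, List.filter_cons]

theorem pvProd_fill (cs : List Char) :
    (pvProdHD (cs.filter (· = '?')).length).map (pvFill cs) = pvFa cs := by
  induction cs with
  | nil => rfl
  | cons c cs ih =>
    by_cases hc : c = '?'
    · subst hc
      have hlen : (('?' :: cs).filter (· = '?')).length = (cs.filter (· = '?')).length + 1 := by
        simp [List.filter_cons]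
      rw [hlen, pvProdHD,
        show pvFa ('?' :: cs) = (pvFa cs).map ("#" :: ·) ++ (pvFa cs).map ("." :: ·) from by
          simp [pvFa],
        ← ih]
      simp only [List.flatMap_cons, List.flatMap_nil, List.append_nil, List.map_append,
        List.map_map]
      congr 1
    · rw [show ((c :: cs).filter (· = '?')) = cs.filter (· = '?') from by
          simp [hc],
        show pvFa (c :: cs) = (pvFa cs).map (String.mk [c] :: ·) from by simp [pvFa, hc],
        ← ih, List.map_map]
      apply List.map_congr_left
      intro t _
      simp [pvFill, hc]

-- A computes pvFa
theorem pvA_eq_fa (line : String) : line_factory line = pvFa line.toList := by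
  unfold line_factory
  rw [PySem.List.foldl_append_eq_flatMap]
  have h1 : ((PySem.List.enumerate line.toList).filter (fun p => p.2 == '?')).map (·.1)
      = pvE 0 line.toList := rfl
  rw [h1]
  simp only [List.nil_append]
  rw [← List.map_eq_flatMap]
  rw [List.map_congr_left (g := pvFill line.toList) (fun sym _ => by
    simpa using pvFill_foldl line.toList 0 [] sym (le_refl 0) rfl)]
  rw [pvE_length, pvProd_fill]

-- B's scan, generalized over the accumulated partial fillings
theorem pvB_fold (cs : List Char) (acc : List (List String)) :
    cs.foldl
        (fun results ch =>
          if ch = '?' then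
            results.foldl
              (fun new partial_ => new ++ [partial_ ++ ["#"], partial_ ++ ["."]]) []
          else
            results.map (fun partial_ => partial_ ++ [String.mk [ch]]))
        acc
      = acc.flatMap (fun p => (pvFa cs).map (p ++ ·)) := by
  induction cs generalizing acc with
  | nil => simp [pvFa]
  | cons c cs ih =>
    rw [List.foldl_cons]
    by_cases hc : c = '?'
    · subst hc
      rw [if_pos rfl, ih, PySem.List.foldl_append_eq_flatMap]
      simp only [List.nil_append, List.flatMap_assoc]
      congr 1
      funext p
      simp [pvFa, List.map_map, Function.comp_def, List.append_assoc]
    · rw [if_neg hc, ih, List.flatMap_map]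
      congr 1
      funext p
      simp [pvFa, hc, List.map_map, Function.comp_def, List.append_assoc]

-- B computes pvFa
theorem pvB_eq_fa (line : String) : line_factory_alt line = pvFa line.toList := by
  unfold line_factory_alt
  rw [pvB_fold]
  simp

-- ===== VERDICT (by name: the statement is the Claim_ definition above) =====
theorem line_factory_spec : Claim_equal_line_factory := by
  intro line _
  unfold Spec_line_factory
  rw [pvA_eq_fa, pvB_eq_fa]
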